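-- pv_equiv track=rewrite | github.com/DingleBells/USACO | milk.py | findBestPrice
-- ===== SOURCE A (Python) =====
-- def findBestPrice(sortedlist, target_bottles):
--     finalprice = 0
--     totalbottles = 0
--     for (price, quantity) in sortedlist:
--         if quantity + totalbottles >= target_bottles:
--             finalprice += price*(target_bottles - totalbottles)
--             return finalprice
--         else:
--             totalbottles += quantity
--             finalprice += price*quantity
--     return 0
-- ===== SOURCE B (Python) =====
-- def findBestPrice(sortedlist, target_bottles):
--     # Build a prefix-sum table of cumulative quantities, locate the first
--     # index whose cumulative quantity reaches the target, then summarize.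
--     prefix = [0]
--     for _, q in sortedlist:
--         prefix.append(prefix[-1] + q)
--     i = next((k for k in range(len(sortedlist)) if prefix[k + 1] >= target_bottles), None)
--     if i is None:
--         return 0
--     return sum(p * q for p, q in sortedlist[:i]) + sortedlist[i][0] * (target_bottles - prefix[i])
-- ===== Notes on version B (the rewrite author's own statement) =====
-- stated objective: alternative
-- what changed: Replaced A's single locate-and-accumulate scan with a build-table-then-summarize decomposition: a prefix-sum table of cumulative quantities, a search for the first index reaching the target, then a summation over the entries before that index.
import Mathlib
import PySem

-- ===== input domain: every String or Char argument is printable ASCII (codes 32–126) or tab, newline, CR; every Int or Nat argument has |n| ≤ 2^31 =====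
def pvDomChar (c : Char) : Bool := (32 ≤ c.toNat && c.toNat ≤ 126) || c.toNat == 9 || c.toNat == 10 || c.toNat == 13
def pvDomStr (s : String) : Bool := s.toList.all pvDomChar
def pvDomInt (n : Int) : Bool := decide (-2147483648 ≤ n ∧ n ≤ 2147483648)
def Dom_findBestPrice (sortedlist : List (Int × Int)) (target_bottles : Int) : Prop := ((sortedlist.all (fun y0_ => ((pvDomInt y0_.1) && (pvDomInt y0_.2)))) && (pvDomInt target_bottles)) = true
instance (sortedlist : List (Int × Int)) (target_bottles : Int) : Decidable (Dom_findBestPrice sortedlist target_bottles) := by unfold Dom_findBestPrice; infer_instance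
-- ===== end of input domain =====

-- B replaces A's single locate-and-accumulate scan by a prefix-sum table, a first-index
-- search, and a summation over the earlier entries (alternative decomposition, same cost).

-- ===== PORT A =====
-- A's loop: accumulators finalprice, totalbottles; returns 0 when the loop finishes.
def findBestPriceAux (l : List (Int × Int)) (target_bottles finalprice totalbottles : Int) : Int :=
  match l with
  | [] => 0
  | (price, quantity) :: rest =>
    if quantity + totalbottles ≥ target_bottles then
      finalprice + price * (target_bottles - totalbottles)
    else
      findBestPriceAux rest target_bottles (finalprice + price * quantity) (totalbottles + quantity)

def findBestPrice (sortedlist : List (Int × Int)) (target_bottles : Int) : Int :=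
  findBestPriceAux sortedlist target_bottles 0 0

-- ===== PORT B =====
-- Source B's prefix loop: prefix = [0]; for _, q in sortedlist: prefix.append(prefix[-1] + q)
def pvPrefix (init : List Int) (l : List (Int × Int)) : List Int :=
  l.foldl (fun acc pq => acc ++ [acc.getLast! + pq.2]) init

def findBestPrice_alt (sortedlist : List (Int × Int)) (target_bottles : Int) : Int :=
  let pfx := pvPrefix [0] sortedlist
  match (List.range sortedlist.length).find?
      (fun k => decide (pfx.getD (k + 1) 0 ≥ target_bottles)) with
  | none => 0
  | some i =>
    ((sortedlist.take i).map (fun pq => pq.1 * pq.2)).sum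
      + (sortedlist.getD i (0, 0)).1 * (target_bottles - pfx.getD i 0)

-- ===== PRECONDITION & SPEC =====
def Spec_findBestPrice (sortedlist : List (Int × Int)) (target_bottles : Int) (out : Int) : Prop := out = findBestPrice_alt sortedlist target_bottles
instance (sortedlist : List (Int × Int)) (target_bottles : Int) (out : Int) : Decidable (Spec_findBestPrice sortedlist target_bottles out) := by unfold Spec_findBestPrice; infer_instance

-- ===== CLAIM (what is proved, stated in full; the proofs are below) =====
def Claim_equal_findBestPrice : Prop := ∀ (sortedlist : List (Int × Int)) (target_bottles : Int), Dom_findBestPrice sortedlist target_bottles → Spec_findBestPrice sortedlist target_bottles (findBestPrice sortedlist target_bottles)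

-- ===== LEMMAS AND PROOFS =====

-- "some cumulative prefix of l reaches target t": when both programs return early.
def pvReach (l : List (Int × Int)) (t : Int) : Bool :=
  match l with
  | [] => false
  | (_, q) :: rest => decide (q ≥ t) || pvReach rest (t - q)

-- the common value of both programs, as a bare structural recursion
def pvCost (l : List (Int × Int)) (t : Int) : Int :=
  match l with
  | [] => 0
  | (p, q) :: rest =>
    if q ≥ t then p * t
    else if pvReach rest (t - q) then p * q + pvCost rest (t - q) else 0

-- B's first-index search, isolated
def pvFind (l : List (Int × Int)) (t : Int) : Option Nat :=
  (List.range l.length).find? (fun k => decide ((pvPrefix [0] l).getD (k + 1) 0 ≥ t))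

theorem pvPrefix_shift (l : List (Int × Int)) (xs : List Int) (c : Int) :
    pvPrefix (xs ++ [c]) l = xs ++ pvPrefix [c] l := by
  induction l generalizing xs c with
  | nil => simp [pvPrefix]
  | cons pq rest ih =>
    simp only [pvPrefix, List.foldl_cons] at *
    rw [show (xs ++ [c]).getLast! = c by simp,
        show (xs ++ [c]) ++ [c + pq.2] = (xs ++ [c]) ++ [c + pq.2] from rfl]
    rw [ih (xs ++ [c]) (c + pq.2)]
    rw [show ([c] : List Int).getLast! = c by simp,
        show ([c] ++ [c + pq.2] : List Int) = [c] ++ [c + pq.2] from rfl]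
    rw [ih [c] (c + pq.2)]
    simp

theorem pvPrefix_cons (p q c : Int) (l : List (Int × Int)) :
    pvPrefix [c] ((p, q) :: l) = c :: pvPrefix [c + q] l := by
  have h : pvPrefix [c] ((p, q) :: l) = pvPrefix ([c] ++ [c + q]) l := by
    simp [pvPrefix]
  rw [h, pvPrefix_shift l [c] (c + q)]
  rfl

theorem pvPrefix_head (c : Int) (l : List (Int × Int)) :
    (pvPrefix [c] l).getD 0 0 = c := by
  cases l with
  | nil => rfl
  | cons pq rest => obtain ⟨p, q⟩ := pq; rw [pvPrefix_cons]; rfl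

theorem pvPrefix_getD (l : List (Int × Int)) (c : Int) (k : Nat) (hk : k ≤ l.length) :
    (pvPrefix [c] l).getD k 0 = (pvPrefix [0] l).getD k 0 + c := by
  induction l generalizing c k with
  | nil =>
    cases k with
    | zero => simp [pvPrefix]
    | succ k' => simp at hk
  | cons pq rest ih =>
    obtain ⟨p, q⟩ := pq
    rw [pvPrefix_cons, pvPrefix_cons]
    cases k with
    | zero => simp
    | succ k' =>
      simp only [List.getD_cons_succ]
      have hk' : k' ≤ rest.length := by simpa using hk
      rw [ih (c + q) k' hk', ih (0 + q) k' hk']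
      ring

theorem find?_congr_mem {α : Type} (l : List α) (p q : α → Bool)
    (h : ∀ a ∈ l, p a = q a) : l.find? p = l.find? q := by
  induction l with
  | nil => rfl
  | cons a rest ih =>
    simp only [List.find?_cons]
    rw [h a List.mem_cons_self]
    cases q a
    · exact ih (fun x hx => h x (List.mem_cons_of_mem a hx))
    · rfl

theorem pvFind_cons (p q t : Int) (l : List (Int × Int)) :
    pvFind ((p, q) :: l) t =
      if q ≥ t then some 0 else (pvFind l (t - q)).map Nat.succ := by
  unfold pvFind
  rw [show ((p, q) :: l).length = l.length + 1 from rfl, List.range_succ_eq_map,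
      List.find?_cons]
  have h0 : (pvPrefix [0] ((p, q) :: l)).getD (0 + 1) 0 = q := by
    rw [pvPrefix_cons]
    simpa using pvPrefix_head (0 + q) l
  rw [h0]
  by_cases hq : q ≥ t
  · simp [hq]
  · simp only [hq, decide_false]
    rw [List.find?_map]
    have hcong : List.find?
          ((fun k => decide ((pvPrefix [0] ((p, q) :: l)).getD (k + 1) 0 ≥ t)) ∘ Nat.succ)
          (List.range l.length)
        = List.find? (fun k => decide ((pvPrefix [0] l).getD (k + 1) 0 ≥ t - q))
          (List.range l.length) := by
      apply find?_congr_mem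
      intro k hk
      have hk' : k + 1 ≤ l.length := by simpa using List.mem_range.mp hk
      simp only [Function.comp_apply, pvPrefix_cons, List.getD_cons_succ]
      rw [pvPrefix_getD l (0 + q) (k + 1) hk']
      simp only [zero_add, decide_eq_decide]
      omega
    rw [hcong]
    simp

theorem pvFind_isSome (l : List (Int × Int)) (t : Int) :
    (pvFind l t).isSome = pvReach l t := by
  induction l generalizing t with
  | nil => rfl
  | cons pq rest ih =>
    obtain ⟨p, q⟩ := pq
    rw [pvFind_cons, pvReach]
    by_cases hq : q ≥ t
    · simp [hq]
    · simp [hq, ih]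

theorem pvFind_mem_lt (l : List (Int × Int)) (t : Int) (k : Nat)
    (h : pvFind l t = some k) : k < l.length := by
  exact List.mem_range.mp (List.mem_of_find?_eq_some h)

theorem alt_eq_find (l : List (Int × Int)) (t : Int) :
    findBestPrice_alt l t =
      match pvFind l t with
      | none => 0
      | some i =>
        ((l.take i).map (fun pq => pq.1 * pq.2)).sum
          + (l.getD i (0, 0)).1 * (t - (pvPrefix [0] l).getD i 0) := rfl

theorem alt_eq_cost (l : List (Int × Int)) (t : Int) :
    findBestPrice_alt l t = pvCost l t := by
  induction l generalizing t with
  | nil => rfl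
  | cons pq rest ih =>
    obtain ⟨p, q⟩ := pq
    rw [alt_eq_find, pvFind_cons, pvCost]
    by_cases hq : q ≥ t
    · simp only [hq, if_true]
      rw [pvPrefix_cons]
      simp
    · simp only [hq, if_false]
      rw [← pvFind_isSome]
      cases hfind : pvFind rest (t - q) with
      | none => simp
      | some k =>
        have hk : k ≤ rest.length := le_of_lt (pvFind_mem_lt rest (t - q) k hfind)
        simp only [Option.map_some, Option.isSome_some, if_true]
        rw [← ih (t - q), alt_eq_find, hfind]
        simp only [List.take_succ_cons, List.map_cons, List.sum_cons,
          List.getD_cons_succ, pvPrefix_cons]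
        rw [pvPrefix_getD rest (0 + q) k hk]
        simp only [zero_add]
        ring

theorem aux_shift (l : List (Int × Int)) (t fp tb : Int) :
    findBestPriceAux l t fp tb =
      if pvReach l (t - tb) then fp + findBestPriceAux l (t - tb) 0 0 else 0 := by
  induction l generalizing t fp tb with
  | nil => simp [findBestPriceAux, pvReach]
  | cons pq rest ih =>
    obtain ⟨p, q⟩ := pq
    rw [findBestPriceAux, findBestPriceAux, pvReach,
        ih t (fp + p * q) (tb + q), ih (t - tb) (0 + p * q) (0 + q),
        show t - (tb + q) = t - tb - q from by ring,
        show t - tb - (0 + q) = t - tb - q from by ring]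
    by_cases hq : q + tb ≥ t
    · have h1 : decide (q ≥ t - tb) = true := by simp; omega
      simp only [if_pos hq, h1, Bool.true_or, if_true,
        if_pos (show q + 0 ≥ t - tb from by omega)]
      ring
    · have h1 : decide (q ≥ t - tb) = false := by simp; omega
      simp only [if_neg hq, h1, Bool.false_or,
        if_neg (show ¬ q + 0 ≥ t - tb from by omega)]
      cases pvReach rest (t - tb - q) with
      | false => simp
      | true => simp only [if_true]; ring

theorem a_eq_cost (l : List (Int × Int)) (t : Int) :
    findBestPriceAux l t 0 0 = pvCost l t := by
  induction l generalizing t with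
  | nil => rfl
  | cons pq rest ih =>
    obtain ⟨p, q⟩ := pq
    rw [findBestPriceAux, pvCost]
    by_cases hq : q + 0 ≥ t
    · simp only [hq, if_true, show q ≥ t from by omega, if_true]
      ring
    · simp only [hq, if_false, show ¬ q ≥ t from by omega, if_false]
      rw [aux_shift rest t (0 + p * q) (0 + q),
          show t - (0 + q) = t - q from by ring]
      cases pvReach rest (t - q) with
      | false => simp
      | true => simp only [if_true]; rw [ih (t - q)]; ring

-- ===== VERDICT (by name: the statement is the Claim_ definition above) =====
theorem findBestPrice_spec : Claim_equal_findBestPrice := by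
  intro l t _
  show findBestPrice l t = findBestPrice_alt l t
  rw [findBestPrice, a_eq_cost, alt_eq_cost]
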